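-- pv_equiv track=rewrite | github.com/AtlantaGeorgia0924/Atlanta-web-crm | services/stock_service.py | order_stock_form_headers
-- ===== SOURCE A (Python) =====
-- def order_stock_form_headers(headers, hidden_form_aliases, essential_aliases):
--     preferred_headers = []
--     remaining_headers = []
--     for header in headers:
--         upper = header.upper()
--         if upper in hidden_form_aliases:
--             continue
--         if upper in essential_aliases:
--             preferred_headers.append(header)
--         else:
--             remaining_headers.append(header)
--     return preferred_headers + remaining_headers
-- ===== SOURCE B (Python) =====
-- def order_stock_form_headers(headers, hidden_form_aliases, essential_aliases):
--     visible = [h for h in headers if h.upper() not in hidden_form_aliases]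
--     return sorted(visible, key=lambda h: h.upper() not in essential_aliases)
-- ===== Notes on version B (the rewrite author's own statement) =====
-- stated objective: idiomatic
-- what changed: Replaces the manual two-bucket partition loop with a filtering comprehension followed by one stable sorted() pass keyed on the boolean 'not essential', which puts essential headers first while preserving original order in each group.
import Mathlib
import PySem

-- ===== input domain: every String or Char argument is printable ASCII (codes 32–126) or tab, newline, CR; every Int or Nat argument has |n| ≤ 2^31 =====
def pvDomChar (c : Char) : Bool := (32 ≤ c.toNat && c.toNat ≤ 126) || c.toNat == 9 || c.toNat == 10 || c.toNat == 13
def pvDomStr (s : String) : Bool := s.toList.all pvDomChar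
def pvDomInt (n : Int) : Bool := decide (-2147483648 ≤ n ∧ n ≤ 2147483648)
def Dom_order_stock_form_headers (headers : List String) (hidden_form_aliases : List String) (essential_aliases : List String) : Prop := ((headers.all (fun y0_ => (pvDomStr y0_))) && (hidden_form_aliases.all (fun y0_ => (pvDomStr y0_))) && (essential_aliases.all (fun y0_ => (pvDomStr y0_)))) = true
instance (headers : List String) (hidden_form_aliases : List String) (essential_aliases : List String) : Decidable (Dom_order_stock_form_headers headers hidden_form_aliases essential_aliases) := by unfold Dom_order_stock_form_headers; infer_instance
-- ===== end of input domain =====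

-- B replaces A's manual two-bucket partition loop with filter + one stable sort on a boolean key (idiomatic; same results).

-- ===== PORT A =====
def order_stock_form_headers (headers : List String) (hidden_form_aliases : List String) (essential_aliases : List String) : List String :=
  let st := headers.foldl (fun (acc : List String × List String) header =>
    let upper := PySem.Str.upper header
    if hidden_form_aliases.contains upper then acc
    else if essential_aliases.contains upper then (acc.1 ++ [header], acc.2)
    else (acc.1, acc.2 ++ [header])) ([], [])
  st.1 ++ st.2

-- ===== PORT B =====
-- Python's bool sort key (False < True) is ported as Nat 0/1 (False ↦ 0, True ↦ 1), the exact order bools sort in.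
def order_stock_form_headers_alt (headers : List String) (hidden_form_aliases : List String) (essential_aliases : List String) : List String :=
  let visible := headers.filter (fun h => !(hidden_form_aliases.contains (PySem.Str.upper h)))
  PySem.List.sorted visible (fun h => if essential_aliases.contains (PySem.Str.upper h) then (0 : Nat) else 1)

-- ===== PRECONDITION & SPEC =====
def Spec_order_stock_form_headers (headers : List String) (hidden_form_aliases : List String) (essential_aliases : List String) (out : List String) : Prop := out = order_stock_form_headers_alt headers hidden_form_aliases essential_aliases
instance (headers : List String) (hidden_form_aliases : List String) (essential_aliases : List String) (out : List String) : Decidable (Spec_order_stock_form_headers headers hidden_form_aliases essential_aliases out) := by unfold Spec_order_stock_form_headers; infer_instance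

-- ===== CLAIM (what is proved, stated in full; the proofs are below) =====
def Claim_equal_order_stock_form_headers : Prop := ∀ (headers : List String) (hidden_form_aliases : List String) (essential_aliases : List String), Dom_order_stock_form_headers headers hidden_form_aliases essential_aliases → Spec_order_stock_form_headers headers hidden_form_aliases essential_aliases (order_stock_form_headers headers hidden_form_aliases essential_aliases)

-- ===== LEMMAS AND PROOFS =====

-- Inserting a key-0 element after the zeros and before the ones.
theorem insertBy_mid {α : Type} (p : α → Bool) (x : α) (A0 A1 : List α)
    (hx : p x = true) (h0 : ∀ a ∈ A0, p a = true) (h1 : ∀ a ∈ A1, p a = false) :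
    PySem.List.insertBy (fun a b => decide ((if p a then (0 : Nat) else 1) < (if p b then (0 : Nat) else 1))) x (A0 ++ A1)
      = A0 ++ x :: A1 := by
  induction A0 with
  | nil =>
    cases A1 with
    | nil => simp [PySem.List.insertBy]
    | cons c cs =>
      have hc := h1 c (by simp)
      simp [PySem.List.insertBy, hx, hc]
  | cons a A0' ih =>
    have ha := h0 a (by simp)
    simp only [List.cons_append, PySem.List.insertBy, hx, ha]
    simp [ih (fun b hb => h0 b (by simp [hb]))]

-- A stable sort on a 0/1 key is the stable partition: p-elements first, then the rest, each in order.
theorem foldl_insertBy_binary {α : Type} (p : α → Bool) (xs A0 A1 : List α)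
    (h0 : ∀ a ∈ A0, p a = true) (h1 : ∀ a ∈ A1, p a = false) :
    xs.foldl (fun acc x => PySem.List.insertBy (fun a b => decide ((if p a then (0 : Nat) else 1) < (if p b then (0 : Nat) else 1))) x acc) (A0 ++ A1)
      = (A0 ++ xs.filter p) ++ (A1 ++ xs.filter (fun a => !p a)) := by
  induction xs generalizing A0 A1 with
  | nil => simp
  | cons x xs ih =>
    simp only [List.foldl_cons]
    by_cases hx : p x = true
    · rw [insertBy_mid p x A0 A1 hx h0 h1]
      have hA0x : ∀ a ∈ A0 ++ [x], p a = true := by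
        intro a ha
        rcases List.mem_append.1 ha with h | h
        · exact h0 a h
        · simp at h; subst h; exact hx
      rw [show A0 ++ x :: A1 = (A0 ++ [x]) ++ A1 by simp, ih (A0 ++ [x]) A1 hA0x h1]
      simp [hx]
    · have hfalse : p x = false := by simpa using hx
      rw [PySem.List.insertBy_of_forall_not_before _ x (A0 ++ A1) (by
        intro y hy
        rcases List.mem_append.1 hy with h | h
        · simp [hfalse, h0 y h]
        · simp [hfalse, h1 y h])]
      have hA1x : ∀ a ∈ A1 ++ [x], p a = false := by
        intro a ha
        rcases List.mem_append.1 ha with h | h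
        · exact h1 a h
        · simp at h; subst h; exact hfalse
      rw [show (A0 ++ A1) ++ [x] = A0 ++ (A1 ++ [x]) by simp, ih A0 (A1 ++ [x]) h0 hA1x]
      simp [hfalse]

theorem sorted_binary {α : Type} (p : α → Bool) (xs : List α) :
    PySem.List.sorted xs (fun h => if p h then (0 : Nat) else 1)
      = xs.filter p ++ xs.filter (fun a => !p a) := by
  rw [PySem.List.sorted_eq_foldl_insertBy]
  simpa using foldl_insertBy_binary p xs [] [] (by simp) (by simp)

-- A's loop, characterised: the two buckets are filters of the input.
theorem A_foldl_char (hidden essential : List String) (xs : List String) (P R : List String) :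
    xs.foldl (fun (acc : List String × List String) header =>
      let upper := PySem.Str.upper header
      if hidden.contains upper then acc
      else if essential.contains upper then (acc.1 ++ [header], acc.2)
      else (acc.1, acc.2 ++ [header])) (P, R)
    = (P ++ xs.filter (fun h => !(hidden.contains (PySem.Str.upper h)) && essential.contains (PySem.Str.upper h)),
       R ++ xs.filter (fun h => !(hidden.contains (PySem.Str.upper h)) && !(essential.contains (PySem.Str.upper h)))) := by
  induction xs generalizing P R with
  | nil => simp
  | cons x xs ih =>
    simp only [List.foldl_cons]
    by_cases hh : PySem.Str.upper x ∈ hidden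
    · simpa [hh, List.filter_cons] using ih P R
    · by_cases he : PySem.Str.upper x ∈ essential
      · simpa [hh, he, List.filter_cons] using ih (P ++ [x]) R
      · simpa [hh, he, List.filter_cons] using ih P (R ++ [x])

-- ===== VERDICT (by name: the statement is the Claim_ definition above) =====
theorem order_stock_form_headers_spec : Claim_equal_order_stock_form_headers := by
  intro headers hidden essential _
  show _ = order_stock_form_headers_alt headers hidden essential
  unfold order_stock_form_headers order_stock_form_headers_alt
  rw [sorted_binary (fun h => essential.contains (PySem.Str.upper h)) _]
  rw [A_foldl_char hidden essential headers [] []]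
  simp [List.filter_filter, Bool.and_comm]
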